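-- pv_equiv track=rewrite | github.com/Lewis-Gallagher/advent-of-code | 2023/Day 07 - Camel Cards/solution.py | replacements
-- ===== SOURCE A (Python) =====
-- from typing import List, Any
--
-- def replacements(hand: str) -> List[str]:
--     '''
--     Takes a hand of cards and recursively calculates all permutations where J can equal 123456789TQKA.
--     '''
--
--     if hand == '':
--         return ['']
--
--     return [
--         i + r
--         for i in ('123456789TQKA' if hand[0] == 'J' else hand[0])
--         for r in replacements(hand[1:])
--         ]
-- ===== SOURCE B (Python) =====
-- from itertools import product
-- from typing import List
--
-- def replacements(hand: str) -> List[str]: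
--     options = ['123456789TQKA' if c == 'J' else c for c in hand]
--     return [''.join(p) for p in product(*options)]
-- ===== Notes on version B (the rewrite author's own statement) =====
-- stated objective: idiomatic
-- what changed: Replaces the suffix recursion with list comprehensions by a per-position options list fed to a single iterative itertools.product enumeration.
import Mathlib
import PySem

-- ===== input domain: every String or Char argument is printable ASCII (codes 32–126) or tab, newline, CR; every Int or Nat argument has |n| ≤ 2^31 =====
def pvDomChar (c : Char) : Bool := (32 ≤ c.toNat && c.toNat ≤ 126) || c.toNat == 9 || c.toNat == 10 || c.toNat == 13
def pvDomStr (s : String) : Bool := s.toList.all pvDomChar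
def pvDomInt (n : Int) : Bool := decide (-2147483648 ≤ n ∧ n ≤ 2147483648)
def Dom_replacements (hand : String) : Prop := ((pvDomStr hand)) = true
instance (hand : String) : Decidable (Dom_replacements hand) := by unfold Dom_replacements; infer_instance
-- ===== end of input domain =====

-- B replaces A's suffix recursion by an options list folded through an iterative product enumeration; same values, no speed claim.

-- ===== PORT A =====
-- A recurses on the string: base case '' → [''], else for each replacement char i of the
-- first card, for each r in replacements(rest), emit i + r.
def replacementsGo : List Char → List String
  | [] => [""]
  | c :: rest =>
      (if c = 'J' then "123456789TQKA".toList else [c]).flatMap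
        (fun i => (replacementsGo rest).map (fun r => i.toString ++ r))

def replacements (hand : String) : List String := replacementsGo hand.toList

-- ===== PORT B =====
-- B: per-position options list, then iterative product (left fold extending each prefix).
def replacements_alt (hand : String) : List String :=
  let options := hand.toList.map (fun c => if c = 'J' then "123456789TQKA".toList else [c])
  options.foldl (fun acc opts => acc.flatMap (fun p => opts.map (fun ch => p ++ ch.toString))) [""]

-- ===== PRECONDITION & SPEC =====
def Spec_replacements (hand : String) (out : List String) : Prop := out = replacements_alt hand
instance (hand : String) (out : List String) : Decidable (Spec_replacements hand out) := by unfold Spec_replacements; infer_instance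

-- ===== CLAIM (what is proved, stated in full; the proofs are below) =====
def Claim_equal_replacements : Prop := ∀ (hand : String), Dom_replacements hand → Spec_replacements hand (replacements hand)

-- ===== LEMMAS AND PROOFS =====

-- The product fold started from any accumulator appends every suffix-result of A to every prefix.
lemma foldl_prod_eq (cs : List Char) : ∀ (acc : List String),
    (cs.map (fun c => if c = 'J' then "123456789TQKA".toList else [c])).foldl
      (fun acc opts => acc.flatMap (fun p => opts.map (fun ch => p ++ ch.toString))) acc
    = acc.flatMap (fun p => (replacementsGo cs).map (fun s => p ++ s)) := by
  induction cs with
  | nil =>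
      intro acc
      simp [replacementsGo]
  | cons c rest ih =>
      intro acc
      simp only [List.map_cons, List.foldl_cons, ih, replacementsGo]
      simp only [List.flatMap_assoc, List.map_flatMap, List.flatMap_map, List.map_map,
        Function.comp_def, ← String.append_assoc]

-- ===== VERDICT (by name: the statement is the Claim_ definition above) =====
theorem replacements_spec : Claim_equal_replacements := by
  intro hand _
  show replacements hand = replacements_alt hand
  unfold replacements replacements_alt
  rw [foldl_prod_eq]
  simp
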